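-- pv_equiv track=rewrite | github.com/patcmorneau/ais-anomaly-detection | src/vader.py | build_vessels_data
-- ===== SOURCE A (Python) =====
-- def vessel_exist(vessels, vessel):
-- 	for boat in vessels:
-- 		if boat == vessel:
-- 			return True
-- 	return False
--
-- def build_vessels_data(dbData):
-- 	vessels = {}
-- 	rowData = []
-- 	for row in dbData:
-- 		vesselID = row[0]
-- 		if vessel_exist(list(vessels.keys()), vesselID):
-- 			rowData = row[1:]
-- 			vesselData = vessels[row[0]]
-- 			vesselData.append(rowData)
-- 			vessels[vesselID] = vesselData
-- 		else:
-- 			rowData = row[1:]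
-- 			vesselData = []
-- 			vesselData.append(rowData)
-- 			vessels[vesselID] = vesselData
--
-- 	return vessels
-- ===== SOURCE B (Python) =====
-- def build_vessels_data(dbData):
-- 	# Simpler: collect the distinct vessel ids in first-occurrence order,
-- 	# then build each group with one comprehension per id.
-- 	ids = dict.fromkeys(row[0] for row in dbData)
-- 	return {vid: [row[1:] for row in dbData if row[0] == vid] for vid in ids}
-- ===== Notes on version B (the rewrite author's own statement) =====
-- stated objective: simpler
-- what changed: Replaces A's incremental dict build with a linear key-membership helper by a two-step comprehension: dedup the vessel ids in first-occurrence order, then one filter-comprehension per id; Pre_ excludes inputs containing an empty row, on which both A and B raise IndexError at row[0].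
import Mathlib
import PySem

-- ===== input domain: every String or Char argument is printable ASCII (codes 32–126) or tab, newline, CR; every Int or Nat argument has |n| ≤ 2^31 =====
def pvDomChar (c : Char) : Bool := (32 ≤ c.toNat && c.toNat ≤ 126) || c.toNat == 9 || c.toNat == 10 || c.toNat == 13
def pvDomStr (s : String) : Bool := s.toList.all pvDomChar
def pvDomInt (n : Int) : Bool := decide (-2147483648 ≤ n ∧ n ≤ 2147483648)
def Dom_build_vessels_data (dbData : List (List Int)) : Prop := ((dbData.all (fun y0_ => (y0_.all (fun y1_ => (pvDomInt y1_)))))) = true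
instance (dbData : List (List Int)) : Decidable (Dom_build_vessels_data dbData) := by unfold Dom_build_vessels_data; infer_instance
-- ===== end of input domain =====

-- B groups by collecting distinct ids first, then filtering per id (simpler decomposition, same cost).

-- ===== PORT A =====
def vessel_exist (vessels : List Int) (vessel : Int) : Bool :=
  match vessels with
  | [] => false
  | boat :: rest => if boat == vessel then true else vessel_exist rest vessel

def build_vessels_data (dbData : List (List Int)) : List (Int × List (List Int)) :=
  (dbData.foldl (fun vessels row =>
    let vesselID := PySem.List.pyGetD row 0 0   -- row[0]; Pre_ excludes the empty row (IndexError)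
    if vessel_exist (PySem.Dict.keys vessels) vesselID then
      let rowData := PySem.List.slice row (some 1) none
      let vesselData := PySem.Dict.getD vessels (PySem.List.pyGetD row 0 0) []  -- vessels[row[0]], key present here
      PySem.Dict.insert vessels vesselID (vesselData ++ [rowData])
    else
      let rowData := PySem.List.slice row (some 1) none
      let vesselData : List (List Int) := []
      PySem.Dict.insert vessels vesselID (vesselData ++ [rowData]))
    PySem.Dict.empty).items

-- ===== PORT B =====
def build_vessels_data_alt (dbData : List (List Int)) : List (Int × List (List Int)) :=
  let ids := PySem.List.dedup (dbData.map (fun row => PySem.List.pyGetD row 0 0))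
  ids.map (fun vid =>
    (vid, (dbData.filter (fun row => PySem.List.pyGetD row 0 0 == vid)).map
            (fun row => PySem.List.slice row (some 1) none)))

-- ===== PRECONDITION & SPEC =====
-- Pre_ excludes inputs containing an empty row: there Python A raises IndexError at row[0].
def Pre_build_vessels_data (dbData : List (List Int)) : Prop := ∀ row ∈ dbData, row ≠ []
instance (dbData : List (List Int)) : Decidable (Pre_build_vessels_data dbData) := by unfold Pre_build_vessels_data; infer_instance
def pvWitness_build_vessels_data : List (List Int) := [[1, 2], [1, 3], [2, 5]]

def Spec_build_vessels_data (dbData : List (List Int)) (out : List (Int × List (List Int))) : Prop := out = build_vessels_data_alt dbData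
instance (dbData : List (List Int)) (out : List (Int × List (List Int))) : Decidable (Spec_build_vessels_data dbData out) := by unfold Spec_build_vessels_data; infer_instance

-- ===== CLAIM (what is proved, stated in full; the proofs are below) =====
def Claim_equal_build_vessels_data : Prop := ∀ (dbData : List (List Int)), Dom_build_vessels_data dbData → Pre_build_vessels_data dbData → Spec_build_vessels_data dbData (build_vessels_data dbData)

-- ===== LEMMAS AND PROOFS =====

theorem vessel_exist_eq_contains (l : List Int) (x : Int) : vessel_exist l x = l.contains x := by
  induction l with
  | nil => rfl
  | cons b rest ih =>
    rw [vessel_exist]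
    by_cases h : b = x
    · simp [h]
    · simp [h, ih, Ne.symm h]

theorem step_eq_modify (vessels : PySem.Dict Int (List (List Int))) (row : List Int) :
    (let vesselID := PySem.List.pyGetD row 0 0
     if vessel_exist (PySem.Dict.keys vessels) vesselID then
       let rowData := PySem.List.slice row (some 1) none
       let vesselData := PySem.Dict.getD vessels (PySem.List.pyGetD row 0 0) []
       PySem.Dict.insert vessels vesselID (vesselData ++ [rowData])
     else
       let rowData := PySem.List.slice row (some 1) none
       let vesselData : List (List Int) := []
       PySem.Dict.insert vessels vesselID (vesselData ++ [rowData])) =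
    PySem.Dict.modify vessels (PySem.List.pyGetD row 0 0)
      [] (fun l => l ++ [PySem.List.slice row (some 1) none]) := by
  set k := PySem.List.pyGetD row 0 0 with hk
  by_cases h : vessel_exist (PySem.Dict.keys vessels) k
  · simp only [h, if_pos]
    rfl
  · simp only [h, if_neg, Bool.false_eq_true, not_false_iff]
    have hc : PySem.Dict.contains vessels k = false := by
      rw [vessel_exist_eq_contains] at h
      simp only [List.contains_eq_mem, Bool.not_eq_true] at h ⊢
      rw [Bool.eq_false_iff]
      intro hcon
      exact absurd ((PySem.Dict.contains_iff_mem_keys vessels k).mp hcon) (by simpa using h)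
    rw [show PySem.Dict.modify vessels k [] (fun l => l ++ [PySem.List.slice row (some 1) none])
          = PySem.Dict.insert vessels k (PySem.Dict.getD vessels k [] ++ [PySem.List.slice row (some 1) none]) from rfl]
    rw [PySem.Dict.getD_of_not_contains (d := vessels) (k := k) (d0 := []) hc]

-- ===== VERDICT (by name: the statement is the Claim_ definition above) =====
theorem build_vessels_data_spec : Claim_equal_build_vessels_data := by
  intro dbData _ _
  unfold Spec_build_vessels_data build_vessels_data build_vessels_data_alt
  rw [show (fun (vessels : PySem.Dict Int (List (List Int))) (row : List Int) =>
        let vesselID := PySem.List.pyGetD row 0 0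
        if vessel_exist (PySem.Dict.keys vessels) vesselID then
          let rowData := PySem.List.slice row (some 1) none
          let vesselData := PySem.Dict.getD vessels (PySem.List.pyGetD row 0 0) []
          PySem.Dict.insert vessels vesselID (vesselData ++ [rowData])
        else
          let rowData := PySem.List.slice row (some 1) none
          let vesselData : List (List Int) := []
          PySem.Dict.insert vessels vesselID (vesselData ++ [rowData]))
      = (fun (vessels : PySem.Dict Int (List (List Int))) (row : List Int) =>
          PySem.Dict.modify vessels (PySem.List.pyGetD row 0 0)
            [] (fun l => l ++ [PySem.List.slice row (some 1) none]))
      from funext fun vessels => funext fun row => step_eq_modify vessels row]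
  rw [show dbData.foldl (fun (d : PySem.Dict Int (List (List Int))) (row : List Int) =>
        PySem.Dict.modify d (PySem.List.pyGetD row 0 0) [] (fun l => l ++ [PySem.List.slice row (some 1) none]))
        PySem.Dict.empty
      = (dbData.map (fun row => (PySem.List.pyGetD row 0 0, PySem.List.slice row (some 1) none))).foldl
          (fun d p => PySem.Dict.modify d p.1 [] (fun l => l ++ [p.2])) PySem.Dict.empty
      from (List.foldl_map
          (f := fun row : List Int => (PySem.List.pyGetD row 0 0, PySem.List.slice row (some 1) none))
          (g := fun (d : PySem.Dict Int (List (List Int))) (p : Int × List Int) =>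
            PySem.Dict.modify d p.1 [] (fun l => l ++ [p.2]))
          (l := dbData) (init := PySem.Dict.empty)).symm]
  set P := dbData.map (fun row => (PySem.List.pyGetD row 0 0, PySem.List.slice row (some 1) none)) with hP
  set D := P.foldl (fun d p => PySem.Dict.modify d p.1 [] (fun l => l ++ [p.2])) PySem.Dict.empty with hD
  have hnd : D.keys.Nodup := by
    rw [hD]
    exact PySem.Dict.nodup_keys_foldl_modify_key P Prod.fst [] (fun d p => fun l => l ++ [p.2])
      PySem.Dict.empty (by simp)
  have hkeys : D.keys = PySem.List.dedup (dbData.map (fun row => PySem.List.pyGetD row 0 0)) := by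
    rw [hD, PySem.Dict.keys_foldl_modify_key, PySem.List.dedup_eq_ofList]
    simp [hP, PySem.Set.update_nil_left, List.map_map, Function.comp_def]
  have hget : ∀ c : Int, D.getD c []
      = (dbData.filter (fun row => PySem.List.pyGetD row 0 0 == c)).map
          (fun row => PySem.List.slice row (some 1) none) := by
    intro c
    rw [hD, PySem.Dict.getD_foldl_modify_append]
    simp [hP, List.filter_map, Function.comp_def]
  rw [PySem.Dict.items_eq_map_keys D hnd [], hkeys]
  simp only [hget]
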